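-- pv_equiv track=rewrite | github.com/alyjnsv/auto-rag | rag_utils.py | split_to_chunks
-- ===== SOURCE A (Python) =====
-- from typing import List, Dict, Tuple
--
-- def split_to_chunks(content: str) -> List[str]:
--     """Разбить markdown по ## (главы)"""
--     lines = content.splitlines()
--     chunks = []
--     buf = []
--     for line in lines:
--         if line.startswith('## '):
--             if buf:
--                 chunks.append('\n'.join(buf).strip())
--                 buf = []
--         buf.append(line)
--     if buf:
--         chunks.append('\n'.join(buf).strip())
--     return [ch for ch in chunks if ch]
-- ===== SOURCE B (Python) =====
-- from typing import List, Dict, Tuple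
--
-- def split_to_chunks(content: str) -> List[str]:
--     """Разбить markdown по ## (главы): найти границу следующей главы, срезать, повторить."""
--     lines = content.splitlines()
--     n = len(lines)
--     segs = []
--     i = 0
--     while i < n:
--         j = i + 1
--         while j < n and not lines[j].startswith('## '):
--             j += 1
--         segs.append('\n'.join(lines[i:j]).strip())
--         i = j
--     return [s for s in segs if s]
-- ===== Notes on version B (the rewrite author's own statement) =====
-- stated objective: alternative
-- what changed: Replaces the stateful buffer/flush accumulation (conditional flush inside the loop plus a trailing flush) with a boundary scan: repeatedly find the index of the next '## ' header and slice the segment out directly.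
import Mathlib
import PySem

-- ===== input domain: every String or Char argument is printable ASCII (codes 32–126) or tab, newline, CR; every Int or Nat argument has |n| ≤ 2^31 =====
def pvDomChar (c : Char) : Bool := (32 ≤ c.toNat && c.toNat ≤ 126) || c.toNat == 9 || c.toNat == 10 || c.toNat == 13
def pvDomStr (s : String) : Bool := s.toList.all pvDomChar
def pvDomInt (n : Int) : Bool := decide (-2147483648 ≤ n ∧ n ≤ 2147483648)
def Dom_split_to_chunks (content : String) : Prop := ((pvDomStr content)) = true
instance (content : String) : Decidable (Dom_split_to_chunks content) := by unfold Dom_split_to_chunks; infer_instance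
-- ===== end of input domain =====

-- B replaces A's stateful buffer/flush accumulation by a boundary scan (find next '## ' header,
-- slice the segment out, repeat); same cost, different decomposition ("alternative").

-- ===== PORT A =====
-- '\n'.join(buf).strip()
def pvJoinStrip (g : List String) : String := PySem.Str.strip (PySem.Str.join "\n" g)

-- the loop body: flush buf on a '## ' header when buf is nonempty, then append the line
def pvStepA (st : List String × List String) (line : String) : List String × List String :=
  if PySem.Str.startswith line "## " && !st.2.isEmpty then
    (st.1 ++ [pvJoinStrip st.2], [line])
  else
    (st.1, st.2 ++ [line])

-- the trailing 'if buf: chunks.append(...)'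
def pvFinishA (st : List String × List String) : List String :=
  if st.2.isEmpty then st.1 else st.1 ++ [pvJoinStrip st.2]

def split_to_chunks (content : String) : List String :=
  let lines := PySem.Str.splitlines content
  let chunks := pvFinishA (lines.foldl pvStepA ([], []))
  chunks.filter (fun ch => ch != "")

-- ===== PORT B =====
-- outer while: chop off lines[i:j] where j is the next header index (inner while = count of
-- leading non-header lines after i); recursion on the remaining suffix lines[j:]
def pvGroupsB : List String → List (List String)
  | [] => []
  | l :: ls =>
    let k := (ls.takeWhile (fun s => !(PySem.Str.startswith s "## "))).length + 1
    ((l :: ls).take k) :: pvGroupsB ((l :: ls).drop k)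
termination_by ls => ls.length
decreasing_by simp

def split_to_chunks_alt (content : String) : List String :=
  let segs := (pvGroupsB (PySem.Str.splitlines content)).map pvJoinStrip
  segs.filter (fun s => s != "")

-- ===== PRECONDITION & SPEC =====
def Spec_split_to_chunks (content : String) (out : List String) : Prop := out = split_to_chunks_alt content
instance (content : String) (out : List String) : Decidable (Spec_split_to_chunks content out) := by unfold Spec_split_to_chunks; infer_instance

-- ===== CLAIM (what is proved, stated in full; the proofs are below) =====
def Claim_equal_split_to_chunks : Prop := ∀ (content : String), Dom_split_to_chunks content → Spec_split_to_chunks content (split_to_chunks content)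

-- ===== LEMMAS AND PROOFS =====

theorem take_len_takeWhile (q : String → Bool) : ∀ ls : List String,
    ls.take (ls.takeWhile q).length = ls.takeWhile q := by
  intro ls
  induction ls with
  | nil => rfl
  | cons l ls ih =>
    by_cases h : q l = true
    · simp [List.takeWhile_cons, h, ih]
    · simp [List.takeWhile_cons, h]

theorem drop_len_takeWhile (q : String → Bool) : ∀ ls : List String,
    ls.drop (ls.takeWhile q).length = ls.dropWhile q := by
  intro ls
  induction ls with
  | nil => rfl
  | cons l ls ih =>
    by_cases h : q l = true
    · simp [List.takeWhile_cons, List.dropWhile_cons, h, ih]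
    · simp [List.takeWhile_cons, List.dropWhile_cons, h]

theorem pvGroupsB_cons (l : String) (ls : List String) :
    pvGroupsB (l :: ls) =
      (l :: ls.takeWhile (fun s => !(PySem.Str.startswith s "## "))) ::
        pvGroupsB (ls.dropWhile (fun s => !(PySem.Str.startswith s "## "))) := by
  conv_lhs => rw [pvGroupsB]
  simp only [List.take_succ_cons, List.drop_succ_cons, take_len_takeWhile, drop_len_takeWhile]

-- loop invariant for A's fold: once buf is nonempty it stays nonempty, and the finished
-- chunk list is the already-flushed chunks followed by the groups of (buf ++ remaining lines)
theorem pvA_inv : ∀ (ls chunks buf : List String), buf ≠ [] →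
    pvFinishA (ls.foldl pvStepA (chunks, buf)) =
      chunks ++ ((buf ++ ls.takeWhile (fun s => !(PySem.Str.startswith s "## "))) ::
        pvGroupsB (ls.dropWhile (fun s => !(PySem.Str.startswith s "## ")))).map pvJoinStrip := by
  intro ls
  induction ls with
  | nil =>
    intro chunks buf hbuf
    simp [pvFinishA, pvGroupsB, List.isEmpty_iff, hbuf]
  | cons l ls ih =>
    intro chunks buf hbuf
    by_cases h : PySem.Chars.startswith l.toList ['#', '#', ' '] = true
    · have hstep : pvStepA (chunks, buf) l = (chunks ++ [pvJoinStrip buf], [l]) := by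
        simp [pvStepA, h, List.isEmpty_iff, hbuf]
      rw [List.foldl_cons, hstep, ih (chunks ++ [pvJoinStrip buf]) [l] (by simp)]
      simp [List.takeWhile_cons, List.dropWhile_cons, h, pvGroupsB_cons]
    · have hstep : pvStepA (chunks, buf) l = (chunks, buf ++ [l]) := by
        simp [pvStepA, eq_false_of_ne_true h]
      rw [List.foldl_cons, hstep, ih chunks (buf ++ [l]) (by simp)]
      simp [List.takeWhile_cons, List.dropWhile_cons, eq_false_of_ne_true h]

theorem pvMain (lines : List String) :
    pvFinishA (lines.foldl pvStepA ([], [])) = (pvGroupsB lines).map pvJoinStrip := by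
  cases lines with
  | nil => simp [pvFinishA, pvGroupsB]
  | cons l ls =>
    have hstep : pvStepA ([], []) l = ([], [l]) := by
      simp [pvStepA]
    rw [List.foldl_cons, hstep, pvA_inv ls [] [l] (by simp), pvGroupsB_cons]
    simp

-- ===== VERDICT (by name: the statement is the Claim_ definition above) =====
theorem split_to_chunks_spec : Claim_equal_split_to_chunks := by
  intro content _
  unfold Spec_split_to_chunks split_to_chunks split_to_chunks_alt
  simp only [pvMain]
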